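-- pv_equiv track=rewrite | github.com/nruiz209487/codewars-katas | python/LeastLarger.py | least_larger
-- ===== SOURCE A (Python) =====
-- def least_larger(lista, indice):
--     target = lista[indice]
--     clostMax = None
--     for x in range(len(lista)):
--         if lista[x] > target:
--             if clostMax is None or lista[x] < lista[clostMax]:
--                 clostMax = x
--     return -1 if clostMax is None else clostMax
-- ===== SOURCE B (Python) =====
-- def least_larger(lista, indice):
--     target = lista[indice]
--     order = sorted(range(len(lista)), key=lambda i: lista[i])
--     for i in order:
--         if lista[i] > target:
--             return i
--     return -1
-- ===== Notes on version B (the rewrite author's own statement) =====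
-- stated objective: alternative
-- what changed: Replaces A's single-pass running-best accumulator with a sort-then-scan: stably sort the indices by value, then return the first index in that order whose value exceeds the target (stability makes ties pick the earliest index).
import Mathlib
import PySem

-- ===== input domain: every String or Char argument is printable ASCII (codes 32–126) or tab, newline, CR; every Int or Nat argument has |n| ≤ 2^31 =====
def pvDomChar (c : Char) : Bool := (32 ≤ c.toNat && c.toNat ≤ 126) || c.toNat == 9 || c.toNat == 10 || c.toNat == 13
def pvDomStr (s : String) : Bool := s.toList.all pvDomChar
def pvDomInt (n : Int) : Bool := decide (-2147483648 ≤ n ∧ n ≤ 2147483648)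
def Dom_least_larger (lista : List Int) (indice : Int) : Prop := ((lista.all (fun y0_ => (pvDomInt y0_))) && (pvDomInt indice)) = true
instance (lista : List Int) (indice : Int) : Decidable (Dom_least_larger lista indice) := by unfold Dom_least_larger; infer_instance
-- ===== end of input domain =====

-- B replaces A's running-best accumulator scan with sort-then-scan: stably sort the
-- indices by value, then return the first index in that order whose value exceeds the
-- target (stability makes ties pick the earliest index). Alternative algorithm, not faster.

-- ===== PORT A =====
-- the loop body of A, named so the lemmas below can state facts about it
def stepA (key : Nat → Int) (target : Int) (acc : Option Nat) (x : Nat) : Option Nat :=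
  if key x > target then
    match acc with
    | none => some x
    | some c => if key x < key c then some x else acc
  else acc

-- target = lista[indice]; then a scan over range(len(lista)) keeping the index of the
-- smallest element strictly larger than target (first seen on ties); -1 if none.
def least_larger (lista : List Int) (indice : Int) : Int :=
  match PySem.List.pyGet? lista indice with
  | none => -1  -- IndexError in Python; excluded by Pre_least_larger
  | some target =>
    let clostMax :=
      (List.range lista.length).foldl (stepA (fun i => lista.getD i 0) target) none
    match clostMax with
    | none => -1
    | some c => (c : Int)

-- ===== PORT B =====
-- order = sorted(range(len(lista)), key=lambda i: lista[i]); first i in order with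
-- lista[i] > target is returned (the for-loop with early return is find?); else -1.
def least_larger_alt (lista : List Int) (indice : Int) : Int :=
  match PySem.List.pyGet? lista indice with
  | none => -1  -- IndexError in Python; excluded by Pre_least_larger
  | some target =>
    let order := PySem.List.sorted (List.range lista.length) (fun i => lista.getD i 0)
    match order.find? (fun i => lista.getD i 0 > target) with
    | none => -1
    | some i => (i : Int)

-- ===== PRECONDITION & SPEC =====
-- Python A raises IndexError when indice is out of range; exactly those inputs are excluded.
def Pre_least_larger (lista : List Int) (indice : Int) : Prop :=
  PySem.Raise.InRange lista.length indice
instance (lista : List Int) (indice : Int) : Decidable (Pre_least_larger lista indice) := by unfold Pre_least_larger; infer_instance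
def pvWitness_least_larger : List Int × Int := ([4, 1, 3, 5, 6], 2)

def Spec_least_larger (lista : List Int) (indice : Int) (out : Int) : Prop := out = least_larger_alt lista indice
instance (lista : List Int) (indice : Int) (out : Int) : Decidable (Spec_least_larger lista indice out) := by unfold Spec_least_larger; infer_instance

-- ===== CLAIM (what is proved, stated in full; the proofs are below) =====
def Claim_equal_least_larger : Prop := ∀ (lista : List Int) (indice : Int), Dom_least_larger lista indice → Pre_least_larger lista indice → Spec_least_larger lista indice (least_larger lista indice)

-- ===== LEMMAS AND PROOFS =====

-- the lexicographic order (value, index) both programs' results are minimal for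
def lexR (key : Nat → Int) (a b : Nat) : Prop := key a < key b ∨ (key a = key b ∧ a < b)

-- stability of PySem's insertion sort on a strictly increasing list of indices:
-- inserting x after everything with key ≤ key x keeps the list lexR-pairwise
theorem insertBy_pairwise_lexR (key : Nat → Int) (x : Nat) (acc : List Nat)
    (hpw : acc.Pairwise (lexR key)) (hlt : ∀ a ∈ acc, a < x) :
    (PySem.List.insertBy (fun a b => decide (key a < key b)) x acc).Pairwise (lexR key) := by
  induction acc with
  | nil => simp [PySem.List.insertBy, lexR]
  | cons y ys ih =>
    by_cases h : key x < key y
    · have : PySem.List.insertBy (fun a b => decide (key a < key b)) x (y :: ys)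
          = x :: y :: ys := by simp [PySem.List.insertBy, h]
      rw [this]
      constructor
      · intro z hz
        rcases List.mem_cons.1 hz with hz | hz
        · subst hz; exact Or.inl h
        · rcases List.rel_of_pairwise_cons hpw hz with h' | ⟨h', _⟩
          · exact Or.inl (lt_trans h h')
          · exact Or.inl (h' ▸ h)
      · exact hpw
    · have : PySem.List.insertBy (fun a b => decide (key a < key b)) x (y :: ys)
          = y :: PySem.List.insertBy (fun a b => decide (key a < key b)) x ys := by
        simp [PySem.List.insertBy, h]
      rw [this]
      constructor
      · intro z hz
        rcases (PySem.List.mem_insertBy _ _ _ _).1 hz with hz | hz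
        · subst hz
          rcases lt_or_eq_of_le (le_of_not_gt h) with h' | h'
          · exact Or.inl h'
          · exact Or.inr ⟨h', hlt y (by simp)⟩
        · exact List.rel_of_pairwise_cons hpw hz
      · exact ih (List.Pairwise.of_cons hpw) (fun a ha => hlt a (List.mem_cons_of_mem _ ha))

-- the stable sort of a strictly increasing index list is lexR-pairwise
theorem sorted_pairwise_lexR (key : Nat → Int) (l : List Nat) (h : l.Pairwise (· < ·)) :
    (PySem.List.sorted l key).Pairwise (lexR key) := by
  rw [PySem.List.sorted_eq_foldl_insertBy]
  suffices H : ∀ (l : List Nat) (acc : List Nat), l.Pairwise (· < ·) →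
      acc.Pairwise (lexR key) → (∀ a ∈ acc, ∀ b ∈ l, a < b) →
      (l.foldl (fun acc x => PySem.List.insertBy (fun a b => decide (key a < key b)) x acc) acc).Pairwise (lexR key) by
    exact H l [] h (by simp) (by simp)
  intro l
  induction l with
  | nil => intro acc _ hacc _; simpa using hacc
  | cons y ys ih =>
    intro acc hl hacc hcross
    simp only [List.foldl_cons]
    apply ih _ (List.Pairwise.of_cons hl)
    · exact insertBy_pairwise_lexR key y acc hacc (fun a ha => hcross a ha y (by simp))
    · intro a ha b hb
      rcases (PySem.List.mem_insertBy _ _ _ _).1 ha with ha | ha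
      · subst ha; exact List.rel_of_pairwise_cons hl hb
      · exact hcross a ha b (List.mem_cons_of_mem _ hb)

-- characterization of A's fold: its result is the lexR-least qualifying index
theorem stepA_skip (key : Nat → Int) (target : Int) (acc : Option Nat) (x : Nat)
    (h : ¬ key x > target) : stepA key target acc x = acc := by
  simp [stepA, h]

theorem foldA_spec (key : Nat → Int) (target : Int) :
    ∀ (l : List Nat) (acc : Option Nat), l.Pairwise (· < ·) →
    (∀ c, acc = some c → target < key c ∧ ∀ x ∈ l, c < x) →
    (let r := l.foldl (stepA key target) acc
     (r = none ↔ acc = none ∧ ∀ x ∈ l, ¬ target < key x) ∧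
     ∀ m, r = some m → target < key m ∧ (acc = some m ∨ m ∈ l) ∧
       ∀ x, (acc = some x ∨ (x ∈ l ∧ target < key x)) → x = m ∨ lexR key m x) := by
  intro l
  induction l with
  | nil =>
    intro acc _ hacc
    refine ⟨by simp, ?_⟩
    intro m hm
    simp only [List.foldl_nil] at hm
    refine ⟨(hacc m hm).1, Or.inl hm, ?_⟩
    intro x hx
    rcases hx with hx | hx
    · left; exact (Option.some.inj (hm.symm.trans hx)).symm
    · simp at hx
  | cons y ys ih =>
    intro acc hl hacc
    simp only [List.foldl_cons]
    by_cases hq : key y > target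
    · -- y qualifies
      cases acc with
      | none =>
        rw [show stepA key target none y = some y from by simp [stepA, hq]]
        have hacc' : ∀ c, (some y : Option Nat) = some c → target < key c ∧ ∀ x ∈ ys, c < x := by
          intro c hc
          cases hc
          exact ⟨hq, fun x hx => List.rel_of_pairwise_cons hl hx⟩
        obtain ⟨hnone, hsome⟩ := ih (some y) (List.Pairwise.of_cons hl) hacc'
        refine ⟨?_, ?_⟩
        · constructor
          · intro h; exact absurd (hnone.1 h).1 (by simp)
          · rintro ⟨_, h2⟩; exact absurd hq (h2 y (by simp))
        · intro m hm
          obtain ⟨h1, h2, h3⟩ := hsome m hm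
          refine ⟨h1, ?_, ?_⟩
          · rcases h2 with h2 | h2
            · cases h2; exact Or.inr (by simp)
            · exact Or.inr (List.mem_cons_of_mem _ h2)
          · intro x hx
            rcases hx with hx | ⟨hx, hqx⟩
            · exact absurd hx (by simp)
            · rcases List.mem_cons.1 hx with hx | hx
              · subst hx; exact h3 x (Or.inl rfl)
              · exact h3 x (Or.inr ⟨hx, hqx⟩)
      | some c =>
        have hc := hacc c rfl
        by_cases hlt : key y < key c
        · rw [show stepA key target (some c) y = some y from by simp [stepA, hq, hlt]]
          have hacc' : ∀ c', (some y : Option Nat) = some c' → target < key c' ∧ ∀ x ∈ ys, c' < x := by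
            intro c' hc'; cases hc'
            exact ⟨hq, fun x hx => List.rel_of_pairwise_cons hl hx⟩
          obtain ⟨hnone, hsome⟩ := ih (some y) (List.Pairwise.of_cons hl) hacc'
          refine ⟨?_, ?_⟩
          · constructor
            · intro h; exact absurd (hnone.1 h).1 (by simp)
            · rintro ⟨h, _⟩; exact absurd h (by simp)
          · intro m hm
            obtain ⟨h1, h2, h3⟩ := hsome m hm
            refine ⟨h1, ?_, ?_⟩
            · rcases h2 with h2 | h2
              · cases h2; exact Or.inr (by simp)
              · exact Or.inr (List.mem_cons_of_mem _ h2)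
            · intro x hx
              rcases hx with hx | ⟨hx, hqx⟩
              · -- x = c, the old accumulator: m ≤lex y <lex c
                cases hx
                rcases h3 y (Or.inl rfl) with h | h
                · subst h; exact Or.inr (Or.inl hlt)
                · rcases h with h | ⟨h, _⟩
                  · exact Or.inr (Or.inl (lt_trans h hlt))
                  · exact Or.inr (Or.inl (h ▸ hlt))
              · rcases List.mem_cons.1 hx with hx | hx
                · subst hx; exact h3 x (Or.inl rfl)
                · exact h3 x (Or.inr ⟨hx, hqx⟩)
        · rw [show stepA key target (some c) y = some c from by simp [stepA, hq, hlt]]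
          have hacc' : ∀ c', (some c : Option Nat) = some c' → target < key c' ∧ ∀ x ∈ ys, c' < x := by
            intro c' hc'; cases hc'
            exact ⟨hc.1, fun x hx => hc.2 x (List.mem_cons_of_mem _ hx)⟩
          obtain ⟨hnone, hsome⟩ := ih (some c) (List.Pairwise.of_cons hl) hacc'
          refine ⟨?_, ?_⟩
          · constructor
            · intro h; exact absurd (hnone.1 h).1 (by simp)
            · rintro ⟨h, _⟩; exact absurd h (by simp)
          · intro m hm
            obtain ⟨h1, h2, h3⟩ := hsome m hm
            refine ⟨h1, ?_, ?_⟩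
            · rcases h2 with h2 | h2
              · exact Or.inl h2
              · exact Or.inr (List.mem_cons_of_mem _ h2)
            · intro x hx
              rcases hx with hx | ⟨hx, hqx⟩
              · exact h3 x (Or.inl hx)
              · rcases List.mem_cons.1 hx with hx | hx
                · -- x = y, skipped because key c ≤ key y; m ≤lex c so m ≤lex y
                  subst hx
                  have hcy : key c ≤ key x := le_of_not_gt hlt
                  rcases h3 c (Or.inl rfl) with h | h
                  · subst h
                    rcases lt_or_eq_of_le hcy with h' | h'
                    · exact Or.inr (Or.inl h')
                    · exact Or.inr (Or.inr ⟨h', hc.2 x (by simp)⟩)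
                  · rcases h with h | ⟨h, hmc⟩
                    · rcases lt_or_eq_of_le hcy with h' | h'
                      · exact Or.inr (Or.inl (lt_trans h h'))
                      · exact Or.inr (Or.inl (h' ▸ h))
                    · rcases lt_or_eq_of_le hcy with h' | h'
                      · exact Or.inr (Or.inl (lt_of_eq_of_lt h h'))
                      · exact Or.inr (Or.inr ⟨h.trans h', lt_trans hmc (hc.2 x (by simp))⟩)
                · exact h3 x (Or.inr ⟨hx, hqx⟩)
    · -- y does not qualify: accumulator unchanged
      rw [stepA_skip key target acc y hq]
      have hacc' : ∀ c, acc = some c → target < key c ∧ ∀ x ∈ ys, c < x := by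
        intro c hc
        exact ⟨(hacc c hc).1, fun x hx => (hacc c hc).2 x (List.mem_cons_of_mem _ hx)⟩
      obtain ⟨hnone, hsome⟩ := ih acc (List.Pairwise.of_cons hl) hacc'
      refine ⟨?_, ?_⟩
      · rw [hnone]
        constructor
        · rintro ⟨h1, h2⟩
          refine ⟨h1, ?_⟩
          intro x hx
          rcases List.mem_cons.1 hx with hx | hx
          · subst hx; exact hq
          · exact h2 x hx
        · rintro ⟨h1, h2⟩
          exact ⟨h1, fun x hx => h2 x (List.mem_cons_of_mem _ hx)⟩
      · intro m hm
        obtain ⟨h1, h2, h3⟩ := hsome m hm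
        refine ⟨h1, ?_, ?_⟩
        · rcases h2 with h2 | h2
          · exact Or.inl h2
          · exact Or.inr (List.mem_cons_of_mem _ h2)
        · intro x hx
          rcases hx with hx | ⟨hx, hqx⟩
          · exact h3 x (Or.inl hx)
          · rcases List.mem_cons.1 hx with hx | hx
            · subst hx; exact absurd hqx hq
            · exact h3 x (Or.inr ⟨hx, hqx⟩)

-- characterization of B's find? on a lexR-pairwise list: first hit is the lexR-least qualifying
theorem findB_spec (key : Nat → Int) (target : Int) :
    ∀ (ord : List Nat), ord.Pairwise (lexR key) →
    (ord.find? (fun i => key i > target) = none ↔ ∀ x ∈ ord, ¬ target < key x) ∧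
    ∀ m, ord.find? (fun i => key i > target) = some m →
      target < key m ∧ m ∈ ord ∧ ∀ x ∈ ord, target < key x → x = m ∨ lexR key m x := by
  intro ord
  induction ord with
  | nil => simp
  | cons y t ih =>
    intro hpw
    obtain ⟨hnone, hsome⟩ := ih (List.Pairwise.of_cons hpw)
    by_cases hq : key y > target
    · rw [show (y :: t).find? (fun i => key i > target) = some y by simp [hq]]
      refine ⟨⟨fun h => by simp at h, fun h => absurd hq (h y (by simp))⟩, ?_⟩
      intro m hm
      cases hm
      refine ⟨hq, by simp, ?_⟩
      intro x hx _
      rcases List.mem_cons.1 hx with hx | hx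
      · subst hx; exact Or.inl rfl
      · exact Or.inr (List.rel_of_pairwise_cons hpw hx)
    · rw [show (y :: t).find? (fun i => key i > target) = t.find? (fun i => key i > target) by
        simp [hq]]
      refine ⟨?_, ?_⟩
      · rw [hnone]
        constructor
        · intro h x hx
          rcases List.mem_cons.1 hx with hx | hx
          · subst hx; exact hq
          · exact h x hx
        · intro h x hx; exact h x (List.mem_cons_of_mem _ hx)
      · intro m hm
        obtain ⟨h1, h2, h3⟩ := hsome m hm
        refine ⟨h1, List.mem_cons_of_mem _ h2, ?_⟩
        intro x hx hqx
        rcases List.mem_cons.1 hx with hx | hx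
        · subst hx; exact absurd hqx hq
        · exact h3 x hx hqx

-- ===== VERDICT (by name: the statement is the Claim_ definition above) =====
theorem least_larger_spec : Claim_equal_least_larger := by
  intro lista indice _ _
  show least_larger lista indice = least_larger_alt lista indice
  unfold least_larger least_larger_alt
  cases hget : PySem.List.pyGet? lista indice with
  | none => rfl
  | some target =>
    simp only
    set key : Nat → Int := fun i => lista.getD i 0 with hkey
    have hrange : (List.range lista.length).Pairwise (· < ·) := List.pairwise_lt_range
    obtain ⟨hAnone, hAsome⟩ := foldA_spec key target (List.range lista.length) none hrange (by simp)
    have hordpw := sorted_pairwise_lexR key (List.range lista.length) hrange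
    obtain ⟨hBnone, hBsome⟩ := findB_spec key target _ hordpw
    have hmem : ∀ x : Nat, x ∈ PySem.List.sorted (List.range lista.length) key ↔ x ∈ List.range lista.length :=
      fun x => PySem.List.mem_sorted _ _ _ _
    cases hA : (List.range lista.length).foldl (stepA key target) none with
    | none =>
      have hnoq := (hAnone.1 hA).2
      have : (PySem.List.sorted (List.range lista.length) key).find? (fun i => key i > target) = none := by
        rw [hBnone]
        intro x hx
        exact hnoq x ((hmem x).1 hx)
      rw [this]
    | some m =>
      obtain ⟨hq1, hq2, hq3⟩ := hAsome m hA
      cases hB : (PySem.List.sorted (List.range lista.length) key).find? (fun i => key i > target) with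
      | none =>
        exact absurd hq1 ((hBnone.1 hB) m ((hmem m).2 (hq2.resolve_left (by simp))))
      | some m' =>
        obtain ⟨hq1', hq2', hq3'⟩ := hBsome m' hB
        have e1 := hq3 m' (Or.inr ⟨(hmem m').1 hq2', hq1'⟩)
        have e2 := hq3' m ((hmem m).2 (hq2.resolve_left (by simp))) hq1
        have : m = m' := by
          rcases e1 with e1 | e1
          · exact e1.symm
          · rcases e2 with e2 | e2
            · exact e2
            · rcases e1 with e1 | ⟨e1a, e1b⟩ <;> rcases e2 with e2 | ⟨e2a, e2b⟩ <;> omega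
        simp [this]
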